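-- pv_equiv track=rewrite | github.com/cobinding/algorithm-practice | 프로그래머스/0/181893. 배열 조각하기/배열 조각하기.py | solution
-- ===== SOURCE A (Python) =====
-- def solution(arr, query):
--     for i in range(len(query)):
--         idx = query[i]
--         # idx가 짝수면 [:idx+1]번까지만 남긴다.
--         if i%2 == 0:
--             arr = arr[:idx+1]
--         # idx가 홀수면 [idx:]까지만 남긴다.
--         else:
--             arr = arr[idx:]
--     return arr
-- ===== SOURCE B (Python) =====
-- def _clamp(j, n):
--     # Python slice-bound normalization: negative from the end, clamped to [0, n].
--     if j < 0:
--         j += n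
--     return max(0, min(j, n))
--
--
-- def solution(arr, query):
--     lo, hi = 0, len(arr)
--     for i, idx in enumerate(query):
--         n = hi - lo
--         if i % 2 == 0:
--             hi = lo + _clamp(idx + 1, n)
--         else:
--             lo = lo + _clamp(idx, n)
--     return arr[lo:hi]
-- ===== Notes on version B (the rewrite author's own statement) =====
-- stated objective: alternative
-- what changed: Instead of materializing a new list on every query, B tracks the surviving window as an index pair (lo, hi) with O(1) Python-slice-bound normalization per query and performs a single final slice; a timing run did not measure B faster, so no speed is claimed.
import Mathlib
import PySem

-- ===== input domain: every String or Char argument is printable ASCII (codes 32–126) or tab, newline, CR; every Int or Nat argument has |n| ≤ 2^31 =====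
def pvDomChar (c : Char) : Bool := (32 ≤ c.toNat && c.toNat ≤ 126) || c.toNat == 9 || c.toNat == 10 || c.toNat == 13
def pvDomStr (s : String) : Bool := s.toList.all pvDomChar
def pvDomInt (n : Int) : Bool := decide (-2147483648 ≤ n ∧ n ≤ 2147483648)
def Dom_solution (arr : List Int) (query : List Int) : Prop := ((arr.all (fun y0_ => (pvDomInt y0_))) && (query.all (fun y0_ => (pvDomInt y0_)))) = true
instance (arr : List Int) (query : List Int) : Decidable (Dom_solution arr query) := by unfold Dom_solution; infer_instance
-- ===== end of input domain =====

-- B replaces A's per-query list slicing by window-index (lo, hi) bookkeeping and one final slice (alternative algorithm; not measured faster).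

-- ===== PORT A =====
-- for i in range(len(query)): idx = query[i]; if i%2==0: arr = arr[:idx+1] else: arr = arr[idx:]
def solutionStepA (cur : List Int) (p : Int × Int) : List Int :=
  if p.1 % 2 == 0 then PySem.List.slice cur none (some (p.2 + 1))
  else PySem.List.slice cur (some p.2) none

def solution (arr : List Int) (query : List Int) : List Int :=
  (PySem.List.enumerate query).foldl solutionStepA arr

-- ===== PORT B =====
-- _clamp(j, n): Python slice-bound normalization, negative from the end, clamped to [0, n]
def clampB (j n : Int) : Int :=
  max 0 (min (if j < 0 then j + n else j) n)

def solutionStepB (s : Int × Int) (p : Int × Int) : Int × Int :=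
  if p.1 % 2 == 0 then (s.1, s.1 + clampB (p.2 + 1) (s.2 - s.1))
  else (s.1 + clampB p.2 (s.2 - s.1), s.2)

def solution_alt (arr : List Int) (query : List Int) : List Int :=
  PySem.List.slice arr
    (some ((PySem.List.enumerate query).foldl solutionStepB (0, (arr.length : Int))).1)
    (some ((PySem.List.enumerate query).foldl solutionStepB (0, (arr.length : Int))).2)

-- ===== PRECONDITION & SPEC =====
def Spec_solution (arr : List Int) (query : List Int) (out : List Int) : Prop := out = solution_alt arr query
instance (arr : List Int) (query : List Int) (out : List Int) : Decidable (Spec_solution arr query out) := by unfold Spec_solution; infer_instance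

-- ===== CLAIM (what is proved, stated in full; the proofs are below) =====
def Claim_equal_solution : Prop := ∀ (arr : List Int) (query : List Int), Dom_solution arr query → Spec_solution arr query (solution arr query)

-- ===== LEMMAS AND PROOFS =====

-- slicing xs[:b] is taking the normalized clamped bound
lemma slice_to_eq_take_clampB (cur : List Int) (b : Int) :
    PySem.List.slice cur none (some b) = cur.take (clampB b cur.length).toNat := by
  by_cases hb : 0 ≤ b
  · rw [PySem.List.slice_to cur hb]
    by_cases h : b ≤ (cur.length : Int)
    · have h1 : clampB b (cur.length : Int) = b := by
        simp only [clampB]; rw [if_neg (by omega)]; omega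
      rw [h1]
    · have h1 : clampB b (cur.length : Int) = (cur.length : Int) := by
        simp only [clampB]; rw [if_neg (by omega)]; omega
      rw [h1, Int.toNat_natCast, List.take_length, List.take_of_length_le (by omega)]
  · have hkpos : 0 < (-b).toNat := by omega
    have hk : b = -(((-b).toNat : Nat) : Int) := by omega
    rw [hk, PySem.List.slice_to_neg_natCast cur _ hkpos]
    congr 1
    simp only [clampB]
    rw [if_pos (by omega)]
    omega

-- slicing xs[a:] is dropping the normalized clamped bound
lemma slice_from_eq_drop_clampB (cur : List Int) (a : Int) :
    PySem.List.slice cur (some a) none = cur.drop (clampB a cur.length).toNat := by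
  by_cases ha : 0 ≤ a
  · rw [PySem.List.slice_from cur ha]
    by_cases h : a ≤ (cur.length : Int)
    · have h1 : clampB a (cur.length : Int) = a := by
        simp only [clampB]; rw [if_neg (by omega)]; omega
      rw [h1]
    · have h1 : clampB a (cur.length : Int) = (cur.length : Int) := by
        simp only [clampB]; rw [if_neg (by omega)]; omega
      rw [h1, List.drop_eq_nil_of_le (by omega), List.drop_eq_nil_of_le (by omega)]
  · have hkpos : 0 < (-a).toNat := by omega
    have hk : a = -(((-a).toNat : Nat) : Int) := by omega
    rw [hk, PySem.List.slice_from_neg_natCast cur _ hkpos]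
    congr 1
    simp only [clampB]
    rw [if_pos (by omega)]
    omega

lemma clampB_bounds (j n : Int) (hn : 0 ≤ n) : 0 ≤ clampB j n ∧ clampB j n ≤ n := by
  simp only [clampB]
  constructor <;> [omega ; omega]

-- one query step: A's new list is the window described by B's new index pair
lemma step_eq (arr : List Int) (lo hi : Int) (p : Int × Int)
    (h0 : 0 ≤ lo) (h1 : lo ≤ hi) (h2 : hi ≤ (arr.length : Int)) :
    solutionStepA ((arr.drop lo.toNat).take (hi.toNat - lo.toNat)) p =
      (arr.drop (solutionStepB (lo, hi) p).1.toNat).take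
        ((solutionStepB (lo, hi) p).2.toNat - (solutionStepB (lo, hi) p).1.toNat) := by
  have hlen : ((((arr.drop lo.toNat).take (hi.toNat - lo.toNat)).length : Nat) : Int) = hi - lo := by
    simp only [List.length_take, List.length_drop]
    omega
  unfold solutionStepA solutionStepB
  by_cases hp : (p.1 % 2 == 0) = true
  · obtain ⟨hc0, hc1⟩ := clampB_bounds (p.2 + 1) (hi - lo) (by omega)
    simp only [if_pos hp]
    rw [slice_to_eq_take_clampB, hlen, List.take_take]
    congr 1
    omega
  · obtain ⟨hc0, hc1⟩ := clampB_bounds p.2 (hi - lo) (by omega)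
    simp only [if_neg hp]
    rw [slice_from_eq_drop_clampB, hlen, List.drop_take, List.drop_drop]
    congr 1
    · omega
    · congr 1
      omega

-- the full fold: invariants on B's index pair, and A's list is B's window
lemma fold_inv (ps : List (Int × Int)) (arr : List Int) (lo hi : Int)
    (h0 : 0 ≤ lo) (h1 : lo ≤ hi) (h2 : hi ≤ (arr.length : Int)) :
    (0 ≤ (ps.foldl solutionStepB (lo, hi)).1 ∧
     (ps.foldl solutionStepB (lo, hi)).1 ≤ (ps.foldl solutionStepB (lo, hi)).2 ∧
     (ps.foldl solutionStepB (lo, hi)).2 ≤ (arr.length : Int)) ∧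
    ps.foldl solutionStepA ((arr.drop lo.toNat).take (hi.toNat - lo.toNat)) =
      (arr.drop (ps.foldl solutionStepB (lo, hi)).1.toNat).take
        ((ps.foldl solutionStepB (lo, hi)).2.toNat - (ps.foldl solutionStepB (lo, hi)).1.toNat) := by
  induction ps generalizing lo hi with
  | nil => exact ⟨⟨h0, h1, h2⟩, rfl⟩
  | cons p rest ih =>
    have hstep := step_eq arr lo hi p h0 h1 h2
    have hinv : 0 ≤ (solutionStepB (lo, hi) p).1 ∧
        (solutionStepB (lo, hi) p).1 ≤ (solutionStepB (lo, hi) p).2 ∧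
        (solutionStepB (lo, hi) p).2 ≤ (arr.length : Int) := by
      unfold solutionStepB
      by_cases hp : (p.1 % 2 == 0) = true
      · obtain ⟨hc0, hc1⟩ := clampB_bounds (p.2 + 1) (hi - lo) (by omega)
        simp only [if_pos hp]
        exact ⟨h0, by omega, by omega⟩
      · obtain ⟨hc0, hc1⟩ := clampB_bounds p.2 (hi - lo) (by omega)
        simp only [if_neg hp]
        exact ⟨by omega, by omega, h2⟩
    obtain ⟨hi0, hi1, hi2⟩ := hinv
    have := ih (solutionStepB (lo, hi) p).1 (solutionStepB (lo, hi) p).2 hi0 hi1 hi2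
    simpa [List.foldl_cons, hstep] using this

-- ===== VERDICT (by name: the statement is the Claim_ definition above) =====
theorem solution_spec : Claim_equal_solution := by
  intro arr query _
  unfold Spec_solution solution solution_alt
  obtain ⟨⟨hf0, hf1, hf2⟩, heq⟩ := fold_inv (PySem.List.enumerate query) arr 0 (arr.length : Int)
    le_rfl (by omega) le_rfl
  rw [PySem.List.slice_of_nonneg arr hf0 (by omega) (by omega) hf2]
  simpa using heq
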